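-- pv_equiv track=rewrite | github.com/DanielLH5/tareaProgramada2 | funciones.py | obtenerIdShiny
-- ===== SOURCE A (Python) =====
-- def obtenerIdShiny(infoAtrapados):
--     """
--     Funcionamiento:
--     Filtra los IDs de Pokémon shiny del diccionario y los agrupa en bloques de 100.
--     Entradas:
--     - infoAtrapados (dict): Diccionario con información de los Pokémon atrapados.
--     Salidas:
--     - matrizShiny (matriz): Lista que contiene sublistas con hasta 100 IDs shiny cada una.
--     """
--     listaIdShiny = []
--     for id, datos in infoAtrapados.items():
--         linkShiny = datos[4]
--         if linkShiny != "":
--             listaIdShiny.append(id)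
--     matrizShiny = []
--     bloque = []
--     for i in range(0, len(listaIdShiny), 100):
--         bloque = listaIdShiny[i:i+100]
--         matrizShiny.append(bloque)
--     return matrizShiny
-- ===== SOURCE B (Python) =====
-- def obtenerIdShiny(infoAtrapados):
--     matrizShiny = []
--     for id, datos in infoAtrapados.items():
--         if datos[4] != "":
--             if not matrizShiny or len(matrizShiny[-1]) == 100:
--                 matrizShiny.append([])
--             matrizShiny[-1].append(id)
--     return matrizShiny
-- ===== Notes on version B (the rewrite author's own statement) =====
-- stated objective: simpler
-- what changed: Fuses A's two passes (filter into an intermediate list, then range/slice chunking) into one pass that appends each shiny id directly to the matrix, opening a fresh block whenever the last one holds 100 ids.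
import Mathlib
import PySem

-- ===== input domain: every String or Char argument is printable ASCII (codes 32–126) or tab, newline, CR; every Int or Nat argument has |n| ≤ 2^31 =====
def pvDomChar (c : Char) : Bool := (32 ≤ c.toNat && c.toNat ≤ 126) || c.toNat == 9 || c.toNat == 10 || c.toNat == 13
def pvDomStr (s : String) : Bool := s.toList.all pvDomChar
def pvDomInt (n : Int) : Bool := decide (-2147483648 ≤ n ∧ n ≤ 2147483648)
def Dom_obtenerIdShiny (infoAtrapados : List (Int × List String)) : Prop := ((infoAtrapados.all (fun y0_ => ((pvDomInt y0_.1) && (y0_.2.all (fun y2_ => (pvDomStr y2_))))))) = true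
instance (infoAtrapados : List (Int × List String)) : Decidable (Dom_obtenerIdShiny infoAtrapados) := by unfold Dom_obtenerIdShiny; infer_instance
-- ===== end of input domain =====

-- B fuses A's two passes (filter, then range/slice chunking) into one pass that appends each
-- shiny id directly to the matrix, opening a fresh block when the last one holds 100 ids (simpler).

-- ===== PORT A =====
def obtenerIdShiny (infoAtrapados : List (Int × List String)) : List (List Int) :=
  let listaIdShiny := infoAtrapados.foldl
    (fun acc p =>
      let linkShiny := (PySem.List.pyGet? p.2 4).getD ""   -- datos[4]; none (IndexError) excluded by Pre_
      if linkShiny ≠ "" then acc ++ [p.1] else acc) []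
  (PySem.List.pyRange 0 (listaIdShiny.length : Int) 100).foldl
    (fun matrizShiny i =>
      let bloque := PySem.List.slice listaIdShiny (some i) (some (i + 100))
      matrizShiny ++ [bloque]) []

-- ===== PORT B =====
def obtenerIdShiny_alt (infoAtrapados : List (Int × List String)) : List (List Int) :=
  infoAtrapados.foldl
    (fun matrizShiny p =>
      let linkShiny := (PySem.List.pyGet? p.2 4).getD ""   -- datos[4]; none (IndexError) excluded by Pre_
      if linkShiny ≠ "" then
        let m := if matrizShiny = [] ∨ (matrizShiny.getLastD []).length = 100
                 then matrizShiny ++ [[]] else matrizShiny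
        m.dropLast ++ [m.getLastD [] ++ [p.1]]
      else matrizShiny) []

-- ===== PRECONDITION & SPEC =====
-- A evaluates datos[4] for every entry: entries with fewer than 5 fields make A raise IndexError.
def Pre_obtenerIdShiny (infoAtrapados : List (Int × List String)) : Prop :=
  ∀ p ∈ infoAtrapados, 4 < p.2.length
instance (infoAtrapados : List (Int × List String)) : Decidable (Pre_obtenerIdShiny infoAtrapados) := by unfold Pre_obtenerIdShiny; infer_instance
def pvWitness_obtenerIdShiny : (List (Int × List String)) :=
  [(1, ["a", "b", "c", "d", "s"]), (2, ["a", "b", "c", "d", ""])]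
def Spec_obtenerIdShiny (infoAtrapados : List (Int × List String)) (out : List (List Int)) : Prop := out = obtenerIdShiny_alt infoAtrapados
instance (infoAtrapados : List (Int × List String)) (out : List (List Int)) : Decidable (Spec_obtenerIdShiny infoAtrapados out) := by unfold Spec_obtenerIdShiny; infer_instance

-- ===== CLAIM (what is proved, stated in full; the proofs are below) =====
def Claim_equal_obtenerIdShiny : Prop := ∀ (infoAtrapados : List (Int × List String)), Dom_obtenerIdShiny infoAtrapados → Pre_obtenerIdShiny infoAtrapados → Spec_obtenerIdShiny infoAtrapados (obtenerIdShiny infoAtrapados)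

-- ===== LEMMAS AND PROOFS =====

-- the shiny test both loop bodies perform, as a Bool predicate
def shinyB (p : Int × List String) : Bool := ((PySem.List.pyGet? p.2 4).getD "") != ""

-- the reference chunking: blocks of 100, in order
def chunk100 (L : List Int) : List (List Int) :=
  if hL : L = [] then [] else L.take 100 :: chunk100 (L.drop 100)
termination_by L.length
decreasing_by
  cases L with
  | nil => exact absurd rfl hL
  | cons a t => simp

-- one step of B's loop on a shiny id
def addOne (m : List (List Int)) (x : Int) : List (List Int) :=
  if m = [] ∨ (m.getLastD []).length = 100 then m ++ [[x]]
  else m.dropLast ++ [m.getLastD [] ++ [x]]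

theorem chunk100_nil : chunk100 [] = [] := by rw [chunk100]; simp

theorem pyRange100_cons (a b : Int) (h : a < b) :
    PySem.List.pyRange a b 100 = a :: PySem.List.pyRange (a + 100) b 100 := by
  rw [PySem.List.pyRange_of_pos a b (by norm_num),
      PySem.List.pyRange_of_pos (a + 100) b (by norm_num)]
  have hn : (if a < b then ((b - a + 100 - 1) / 100).toNat else 0)
      = (if a + 100 < b then ((b - (a + 100) + 100 - 1) / 100).toNat else 0) + 1 := by
    split_ifs <;> omega
  rw [hn, List.range_succ_eq_map]
  simp only [List.map_cons, List.map_map, Nat.cast_zero, mul_zero, add_zero]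
  congr 1
  apply List.map_congr_left
  intro k _
  simp [Function.comp]
  ring

theorem pyRange100_nil (a b : Int) (h : b ≤ a) : PySem.List.pyRange a b 100 = [] := by
  rw [PySem.List.pyRange_of_pos a b (by norm_num)]
  simp [show ¬ a < b by omega]

-- A's chunking loop computes chunk100
theorem rangefold (X : List Int) (k : Nat) (acc : List (List Int)) :
    (PySem.List.pyRange (k : Int) (X.length : Int) 100).foldl
      (fun m i => m ++ [PySem.List.slice X (some i) (some (i + 100))]) acc
    = acc ++ chunk100 (X.drop k) := by
  by_cases hk : k < X.length
  · rw [pyRange100_cons _ _ (by exact_mod_cast hk)]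
    simp only [List.foldl_cons]
    have hsl : PySem.List.slice X (some (k : Int)) (some ((k : Int) + 100))
        = (X.drop k).take 100 := by
      have := PySem.List.slice_natCast_add X k 100
      simpa using this
    rw [hsl]
    have h100 : ((k : Int) + 100) = ((k + 100 : Nat) : Int) := by push_cast; ring
    rw [h100, rangefold X (k + 100) (acc ++ [(X.drop k).take 100])]
    have hne : X.drop k ≠ [] := by
      intro hc
      have := List.drop_eq_nil_iff.mp hc
      omega
    conv_rhs => rw [chunk100]
    rw [dif_neg hne]
    simp [List.drop_drop, List.append_assoc]
  · rw [pyRange100_nil _ _ (by exact_mod_cast Nat.le_of_not_lt hk)]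
    simp [List.drop_eq_nil_of_le (Nat.le_of_not_lt hk), chunk100_nil]
termination_by X.length - k
decreasing_by omega

-- appending one id to the flat list appends it to the last (non-full) block
theorem chunk100_snoc (F : List Int) (x : Int) :
    chunk100 (F ++ [x]) = addOne (chunk100 F) x := by
  by_cases hF : F = []
  · subst hF
    simp only [List.nil_append]
    rw [chunk100]
    simp [chunk100_nil, addOne]
  · rw [chunk100, dif_neg (by simp)]
    by_cases h100 : 100 ≤ F.length
    · rw [List.take_append_of_le_length h100, List.drop_append_of_le_length h100]
      rw [chunk100_snoc (F.drop 100) x]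
      conv_rhs => rw [chunk100, dif_neg hF]
      have hb : (F.take 100).length = 100 := by simp; omega
      generalize chunk100 (F.drop 100) = m
      unfold addOne
      by_cases hm : m = []
      · subst hm; simp [hb]
      · have hlast : (F.take 100 :: m).getLast? = m.getLast? := by
          cases m with
          | nil => exact absurd rfl hm
          | cons a t => simp
        have hdrop : (F.take 100 :: m).dropLast = F.take 100 :: m.dropLast := by
          cases m with
          | nil => exact absurd rfl hm
          | cons a t => simp
        simp [hm, hlast, hdrop, List.getLastD_eq_getLast?]
        split_ifs <;> rfl
    · have hlt : F.length < 100 := Nat.lt_of_not_le h100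
      rw [List.take_of_length_le (by simp; omega),
          List.drop_eq_nil_of_le (by simp; omega), chunk100_nil]
      conv_rhs => rw [chunk100, dif_neg hF]
      rw [List.take_of_length_le (by omega), List.drop_eq_nil_of_le (by omega), chunk100_nil]
      unfold addOne
      rw [if_neg (by simp [List.getLastD_eq_getLast?]; omega)]
      simp
termination_by F.length
decreasing_by
  have h0 : 0 < F.length := List.length_pos_of_ne_nil hF
  simp
  omega

-- B's loop body is exactly addOne on shiny entries
theorem altBody_eq (m : List (List Int)) (p : Int × List String) :
    (let linkShiny := (PySem.List.pyGet? p.2 4).getD ""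
     if linkShiny ≠ "" then
       let m2 := if m = [] ∨ (m.getLastD []).length = 100 then m ++ [[]] else m
       m2.dropLast ++ [m2.getLastD [] ++ [p.1]]
     else m)
    = if shinyB p then addOne m p.1 else m := by
  by_cases h : (PySem.List.pyGet? p.2 4).getD "" = ""
  · simp [shinyB, h]
  · simp [shinyB, h, addOne, List.getLastD_eq_getLast?]
    split_ifs with hc
    · simp
    · rfl

-- B's fold extends chunk100 of the ids filtered so far
theorem B_loop (L : List (Int × List String)) (F : List Int) :
    L.foldl (fun m p => if shinyB p then addOne m p.1 else m) (chunk100 F)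
    = chunk100 (F ++ (L.filter shinyB).map Prod.fst) := by
  induction L generalizing F with
  | nil => simp
  | cons p L ih =>
    simp only [List.foldl_cons]
    by_cases hp : shinyB p
    · rw [if_pos hp, ← chunk100_snoc, ih (F ++ [p.1])]
      simp [hp]
    · rw [if_neg hp, ih F]
      simp [hp]

theorem alt_eq (L : List (Int × List String)) :
    obtenerIdShiny_alt L = chunk100 ((L.filter shinyB).map Prod.fst) := by
  have hb : (fun (m : List (List Int)) (p : Int × List String) =>
      let linkShiny := (PySem.List.pyGet? p.2 4).getD ""
      if linkShiny ≠ "" then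
        let m2 := if m = [] ∨ (m.getLastD []).length = 100 then m ++ [[]] else m
        m2.dropLast ++ [m2.getLastD [] ++ [p.1]]
      else m)
      = fun m p => if shinyB p then addOne m p.1 else m :=
    funext fun m => funext fun p => altBody_eq m p
  unfold obtenerIdShiny_alt
  rw [hb]
  have h := B_loop L []
  rw [chunk100_nil] at h
  simpa using h

theorem a_eq (L : List (Int × List String)) :
    obtenerIdShiny L = chunk100 ((L.filter shinyB).map Prod.fst) := by
  have hf : (fun (acc : List Int) (p : Int × List String) =>
      let linkShiny := (PySem.List.pyGet? p.2 4).getD ""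
      if linkShiny ≠ "" then acc ++ [p.1] else acc)
      = fun acc p => if shinyB p = true then acc ++ [Prod.fst p] else acc := by
    funext acc p
    by_cases h : (PySem.List.pyGet? p.2 4).getD "" = "" <;> simp [shinyB, h]
  simp only [obtenerIdShiny]
  rw [hf, PySem.List.foldl_append_if shinyB Prod.fst]
  simp only [List.nil_append]
  have := rangefold ((L.filter shinyB).map Prod.fst) 0 []
  simpa using this

-- ===== VERDICT (by name: the statement is the Claim_ definition above) =====
theorem obtenerIdShiny_spec : Claim_equal_obtenerIdShiny := by
  intro L _ _
  unfold Spec_obtenerIdShiny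
  rw [a_eq, alt_eq]
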